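-- pv_equiv track=rewrite | github.com/JIKMAN/Algorithm | coding_test/202130503.py | exam5
-- ===== SOURCE A (Python) =====
-- def exam5(arr, n):
--     arr.sort()
--     start = 0
--     end = len(arr) - 1
--     cnt = 1
--
--     while start <= end:
--         mid = (start + end) // 2
--
--         if arr[mid] == n:
--             return cnt
--         elif arr[mid] < n:
--             start = mid + 1
--         else:
--             end = mid -1
--         cnt += 1
-- ===== SOURCE B (Python) =====
-- def exam5(arr, n):
--     arr.sort()
--     s = arr
--     cnt = 1
--     while s:
--         m = (len(s) - 1) // 2
--         v = s[m]
--         if v == n: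
--             return cnt
--         if v < n:
--             s = s[m + 1:]
--         else:
--             s = s[:m]
--         cnt += 1
-- ===== Notes on version B (the rewrite author's own statement) =====
-- stated objective: alternative
-- what changed: instead of A's index arithmetic on (start, end) bounds over the full sorted list, B repeatedly shrinks the list itself by slicing (s[m+1:] / s[:m]) around the relative midpoint (len(s)-1)//2, so the loop state is a sublist rather than a pair of indices
import Mathlib
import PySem

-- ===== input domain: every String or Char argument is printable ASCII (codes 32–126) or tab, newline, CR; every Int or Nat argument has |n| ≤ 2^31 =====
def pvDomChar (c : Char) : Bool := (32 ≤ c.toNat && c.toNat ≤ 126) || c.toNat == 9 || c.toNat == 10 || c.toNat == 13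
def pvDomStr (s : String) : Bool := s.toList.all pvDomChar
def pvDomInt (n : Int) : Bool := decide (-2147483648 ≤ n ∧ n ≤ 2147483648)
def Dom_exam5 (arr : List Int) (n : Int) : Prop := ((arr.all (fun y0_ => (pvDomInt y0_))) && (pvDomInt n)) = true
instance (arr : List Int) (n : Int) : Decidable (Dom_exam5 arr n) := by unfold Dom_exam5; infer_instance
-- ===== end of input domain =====

-- B replaces A's index arithmetic on (start, end) over the full sorted list by slicing: the loop
-- state is the remaining sublist itself, cut around its relative midpoint (len(s)-1)//2; same cost.
-- Both programs sort arr in place (the same mutation); the equivalence proved is about the return value.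

-- ===== PORT A =====
def exam5Loop (arr : List Int) (n : Int) (start end_ cnt : Int) : Option Int :=
  if h : start ≤ end_ then
    let mid := PySem.Int.floordiv (start + end_) 2
    match PySem.List.pyGet? arr mid with
    | none => none
    | some v =>
      if v = n then some cnt
      else if v < n then exam5Loop arr n (mid + 1) end_ (cnt + 1)
      else exam5Loop arr n start (mid - 1) (cnt + 1)
  else none
termination_by (end_ - start + 1).toNat
decreasing_by
  · have := PySem.Int.floordiv_two_mid_bounds h; omega
  · have := PySem.Int.floordiv_two_mid_bounds h; omega

def exam5 (arr : List Int) (n : Int) : Option Int :=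
  let sa := PySem.List.sorted arr (fun x => x) false
  exam5Loop sa n 0 ((sa.length : Int) - 1) 1

-- ===== PORT B =====
-- B's while loop over the shrinking sublist s. s[m] with m = (len(s)-1)//2 is always in range
-- (m < len s when s ≠ []), so plain getD is exact there; the nonnegative in-range slices
-- s[m+1:] and s[:m] are exactly drop (m+1) and take m.
def exam5Go (n : Int) (s : List Int) (cnt : Int) : Option Int :=
  match s with
  | [] => none
  | x :: t =>
    let m : Nat := ((x :: t).length - 1) / 2
    let v := (x :: t).getD m 0
    if v = n then some cnt
    else if v < n then exam5Go n ((x :: t).drop (m + 1)) (cnt + 1)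
    else exam5Go n ((x :: t).take m) (cnt + 1)
termination_by s.length
decreasing_by
  · simp only [List.length_drop, List.length_cons]; omega
  · simp only [List.length_take, List.length_cons]; omega

def exam5_alt (arr : List Int) (n : Int) : Option Int :=
  exam5Go n (PySem.List.sorted arr (fun x => x) false) 1

-- ===== PRECONDITION & SPEC =====
def Spec_exam5 (arr : List Int) (n : Int) (out : Option Int) : Prop := out = exam5_alt arr n
instance (arr : List Int) (n : Int) (out : Option Int) : Decidable (Spec_exam5 arr n out) := by unfold Spec_exam5; infer_instance

-- ===== CLAIM (what is proved, stated in full; the proofs are below) =====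
def Claim_equal_exam5 : Prop := ∀ (arr : List Int) (n : Int), Dom_exam5 arr n → Spec_exam5 arr n (exam5 arr n)

-- ===== LEMMAS AND PROOFS =====

-- one unfolding of B's loop on a nonempty list
theorem exam5Go_step (n : Int) (s : List Int) (hne : s ≠ []) (cnt : Int) :
    exam5Go n s cnt =
      if s.getD ((s.length - 1) / 2) 0 = n then some cnt
      else if s.getD ((s.length - 1) / 2) 0 < n then
        exam5Go n (s.drop ((s.length - 1) / 2 + 1)) (cnt + 1)
      else exam5Go n (s.take ((s.length - 1) / 2)) (cnt + 1) := by
  cases s with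
  | nil => exact absurd rfl hne
  | cons x t => rw [exam5Go]

-- A's loop on bounds (start, end_) equals B's loop on the sublist arr[start..end_].
theorem exam5Loop_eq_go (arr : List Int) (n start end_ cnt : Int)
    (hs : 0 ≤ start) (he : end_ < (arr.length : Int)) :
    exam5Loop arr n start end_ cnt
      = exam5Go n ((arr.drop start.toNat).take (end_ - start + 1).toNat) cnt := by
  rw [exam5Loop]
  by_cases h : start ≤ end_
  · have hlen : ((arr.drop start.toNat).take (end_ - start + 1).toNat).length
        = (end_ - start + 1).toNat := by
      simp only [List.length_take, List.length_drop]; omega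
    have hne : (arr.drop start.toNat).take (end_ - start + 1).toNat ≠ [] := by
      intro hc; rw [hc] at hlen; simp at hlen; omega
    rw [exam5Go_step n _ hne cnt, hlen]
    have hmid : PySem.Int.floordiv (start + end_) 2
        = start + ((((end_ - start + 1).toNat - 1) / 2 : Nat) : Int) := by
      rw [PySem.Int.floordiv_eq_ediv_of_pos (by norm_num)]
      omega
    have hlt : ((end_ - start + 1).toNat - 1) / 2
        < ((arr.drop start.toNat).take (end_ - start + 1).toNat).length := by
      rw [hlen]; omega
    have hv : PySem.List.pyGet? arr
          (start + ((((end_ - start + 1).toNat - 1) / 2 : Nat) : Int))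
        = some (((arr.drop start.toNat).take (end_ - start + 1).toNat).getD
            (((end_ - start + 1).toNat - 1) / 2) 0) := by
      rw [PySem.List.pyGet?_eq_some_getElem arr (by omega) (by omega)]
      rw [List.getD_eq_getElem _ 0 hlt]
      simp only [List.getElem_take, List.getElem_drop]
      have e0 : (start + ((((end_ - start + 1).toNat - 1) / 2 : Nat) : Int)).toNat
          = start.toNat + ((end_ - start + 1).toNat - 1) / 2 := by omega
      simp only [e0]
    simp only [dif_pos h, hmid, hv]
    split_ifs with h1 h2
    · rfl
    · rw [exam5Loop_eq_go arr n
        (start + ((((end_ - start + 1).toNat - 1) / 2 : Nat) : Int) + 1) end_ (cnt + 1)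
        (by omega) he]
      congr 1
      have e1 : (start + ((((end_ - start + 1).toNat - 1) / 2 : Nat) : Int) + 1).toNat
          = start.toNat + (((end_ - start + 1).toNat - 1) / 2 + 1) := by omega
      have e2 : (end_ - (start + ((((end_ - start + 1).toNat - 1) / 2 : Nat) : Int) + 1) + 1).toNat
          = (end_ - start + 1).toNat - (((end_ - start + 1).toNat - 1) / 2 + 1) := by omega
      rw [e1, e2, List.drop_take, List.drop_drop]
    · rw [exam5Loop_eq_go arr n start
        (start + ((((end_ - start + 1).toNat - 1) / 2 : Nat) : Int) - 1) (cnt + 1)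
        hs (by omega)]
      congr 1
      have e3 : (start + ((((end_ - start + 1).toNat - 1) / 2 : Nat) : Int) - 1 - start + 1).toNat
          = ((end_ - start + 1).toNat - 1) / 2 := by omega
      have e4 : min (((end_ - start + 1).toNat - 1) / 2) (end_ - start + 1).toNat
          = ((end_ - start + 1).toNat - 1) / 2 := by omega
      rw [e3, List.take_take, e4]
  · have h0 : (end_ - start + 1).toNat = 0 := by omega
    rw [h0]
    simp [h, exam5Go]
termination_by (end_ - start + 1).toNat
decreasing_by
  all_goals omega

-- ===== VERDICT (by name: the statement is the Claim_ definition above) =====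
theorem exam5_spec : Claim_equal_exam5 := by
  intro arr n _
  unfold Spec_exam5 exam5 exam5_alt
  rw [exam5Loop_eq_go _ _ _ _ _ (by omega) (by omega)]
  congr 1
  simp
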